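-- pv_equiv track=rewrite | github.com/mkuiack/FlowerChallenge | Flowers.py | parse_design_string
-- ===== SOURCE A (Python) =====
-- from typing import Tuple
--
-- def parse_design_string(design_string: str) -> Tuple[str, str, list, int]:
--     """
--     Parse design string.
--
--     Input:  Design string (string)
--     Output: design name (str), flower size (str), flower type maxes (str), bouquet sum (int)
--     """
--
--     parsed_str = ""
--
--     for char in design_string:
--         if char.isalpha():
--             parsed_str += char+","
--         else:
--             parsed_str += char
--
--     parsed_list = parsed_str.split(",")
--
--     return parsed_list[0], parsed_list[1], parsed_list[2:-1], int(parsed_list[-1])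
-- ===== SOURCE B (Python) =====
-- def parse_design_string(design_string):
--     tokens = []
--     cur = ""
--     for char in design_string:
--         if char.isalpha():
--             tokens.append(cur + char)
--             cur = ""
--         elif char == ",":
--             tokens.append(cur)
--             cur = ""
--         else:
--             cur += char
--     tokens.append(cur)
--     return tokens[0], tokens[1], tokens[2:-1], int(tokens[-1])
-- ===== Notes on version B (the rewrite author's own statement) =====
-- stated objective: simpler
-- what changed: B tokenizes in a single pass with a current-token accumulator (closing a token on an alphabetic char or a literal comma) instead of first concatenating a comma-delimited string and then splitting it.
import Mathlib
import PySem

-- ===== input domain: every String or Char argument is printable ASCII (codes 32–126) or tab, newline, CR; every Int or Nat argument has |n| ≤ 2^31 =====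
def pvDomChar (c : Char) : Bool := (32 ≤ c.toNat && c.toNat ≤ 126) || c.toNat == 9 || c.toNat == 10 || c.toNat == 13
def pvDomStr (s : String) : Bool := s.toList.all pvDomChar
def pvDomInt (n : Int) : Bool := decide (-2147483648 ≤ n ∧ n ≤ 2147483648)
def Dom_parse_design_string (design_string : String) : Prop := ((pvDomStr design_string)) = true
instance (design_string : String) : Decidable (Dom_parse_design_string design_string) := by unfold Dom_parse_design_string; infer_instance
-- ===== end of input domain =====

-- B builds the token list directly in one character pass instead of concatenating a
-- comma-delimited string and splitting it afterwards (objective: simpler decomposition).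


-- ===== PORT A =====
-- A: build a string with a ',' appended after every alphabetic char, then split on ','.
def parse_design_string (design_string : String) : String × String × List String × Int :=
  let parsed_str : List Char :=
    design_string.toList.foldl
      (fun acc c => if PySem.Chars.isalpha c then acc ++ [c, ','] else acc ++ [c]) []
  let parsed_list : List (List Char) := PySem.Chars.splitOn parsed_str [',']
  (String.ofList (PySem.List.pyGetD parsed_list 0 []),
   String.ofList (PySem.List.pyGetD parsed_list 1 []),
   (PySem.List.slice parsed_list (some 2) (some (-1))).map String.ofList,
   (PySem.Int.ofChars? (PySem.List.pyGetD parsed_list (-1) [])).getD 0)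

-- ===== PORT B =====
-- B: one pass, accumulating the current token; an alphabetic char closes the token
-- (included), a literal ',' closes it (excluded), anything else extends it.
def pvAltStep (st : List (List Char) × List Char) (c : Char) : List (List Char) × List Char :=
  if PySem.Chars.isalpha c then (st.1 ++ [st.2 ++ [c]], [])
  else if c = ',' then (st.1 ++ [st.2], [])
  else (st.1, st.2 ++ [c])

def parse_design_string_alt (design_string : String) : String × String × List String × Int :=
  let st := design_string.toList.foldl pvAltStep ([], [])
  let tokens : List (List Char) := st.1 ++ [st.2]
  (String.ofList (PySem.List.pyGetD tokens 0 []),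
   String.ofList (PySem.List.pyGetD tokens 1 []),
   (PySem.List.slice tokens (some 2) (some (-1))).map String.ofList,
   (PySem.Int.ofChars? (PySem.List.pyGetD tokens (-1) [])).getD 0)

-- ===== PRECONDITION & SPEC =====
def pvSep (c : Char) : Bool := PySem.Chars.isalpha c || c == ','

-- Pre_ excludes exactly the inputs on which the Python A raises: with no alphabetic or comma
-- character there is no second list element (IndexError), and int() of the part after the last
-- such character must parse (else ValueError).
def Pre_parse_design_string (design_string : String) : Prop :=
  (design_string.toList.any pvSep) = true ∧
  (PySem.Int.ofChars? ((design_string.toList.reverse.takeWhile (fun c => !pvSep c)).reverse)).isSome = true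
instance (design_string : String) : Decidable (Pre_parse_design_string design_string) := by
  unfold Pre_parse_design_string; infer_instance

def pvWitness_parse_design_string : String := "AL10a15b5"

def Spec_parse_design_string (design_string : String) (out : String × String × List String × Int) : Prop := out = parse_design_string_alt design_string
instance (design_string : String) (out : String × String × List String × Int) : Decidable (Spec_parse_design_string design_string out) := by unfold Spec_parse_design_string; infer_instance

-- ===== CLAIM (what is proved, stated in full; the proofs are below) =====
def Claim_equal_parse_design_string : Prop := ∀ (design_string : String), Dom_parse_design_string design_string → Pre_parse_design_string design_string → Spec_parse_design_string design_string (parse_design_string design_string)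

-- ===== LEMMAS AND PROOFS =====

-- reference tokenizer: split a char list at ',' (front recursion)
def pvTok : List Char → List (List Char)
  | [] => [[]]
  | c :: rest =>
    if c = ',' then [] :: pvTok rest
    else match pvTok rest with
      | [] => [[c]]
      | t :: ts => (c :: t) :: ts

def pvGlue (p : List Char) : List (List Char) → List (List Char)
  | [] => []
  | t :: ts => (p ++ t) :: ts

def pvEmit (c : Char) : List Char := if PySem.Chars.isalpha c then [c, ','] else [c]

lemma pvTok_ne_nil (l : List Char) : pvTok l ≠ [] := by
  cases l with
  | nil => simp [pvTok]
  | cons c rest =>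
    simp only [pvTok]
    split
    · simp
    · cases h : pvTok rest <;> simp

lemma pvGlue_nil (l : List Char) : pvGlue [] (pvTok l) = pvTok l := by
  cases h : pvTok l with
  | nil => exact absurd h (pvTok_ne_nil l)
  | cons t ts => simp [pvGlue]

lemma go_spec : ∀ (fuel : Nat) (l cur : List Char) (acc : List (List Char)),
    l.length < fuel →
    PySem.Chars.splitOn.go [','] fuel l cur acc = acc.reverse ++ pvGlue cur.reverse (pvTok l) := by
  intro fuel
  induction fuel with
  | zero => intro l cur acc h; omega
  | succ n ih =>
    intro l cur acc h
    cases l with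
    | nil =>
      simp [PySem.Chars.splitOn.go, pvTok, pvGlue]
    | cons c rest =>
      simp only [PySem.Chars.splitOn.go]
      by_cases hc : c = ','
      · subst hc
        have hpre : List.isPrefixOf [','] (',' :: rest) = true := by
          simp [List.isPrefixOf]
        rw [if_pos hpre]
        have := ih rest [] (cur.reverse :: acc) (by simp at h ⊢; omega)
        simp only [List.length_singleton, List.drop_succ_cons, List.drop_zero]
        rw [this]
        simp only [List.reverse_nil]
        rw [pvGlue_nil]
        simp [pvTok, pvGlue]
      · have hpre : List.isPrefixOf [','] (c :: rest) = false := by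
          simp [List.isPrefixOf]
          exact fun hh => absurd hh.symm hc
        rw [if_neg (by simp [hpre])]
        have := ih rest (c :: cur) acc (by simp at h ⊢; omega)
        rw [this]
        simp only [pvTok, if_neg hc]
        cases ht : pvTok rest with
        | nil => exact absurd ht (pvTok_ne_nil rest)
        | cons t ts => simp [pvGlue]

lemma splitOn_comma (l : List Char) : PySem.Chars.splitOn l [','] = pvTok l := by
  unfold PySem.Chars.splitOn
  rw [go_spec (l.length + 1) l [] [] (by omega)]
  simp [pvGlue_nil]

lemma isalpha_comma : PySem.Chars.isalpha ',' = false := by decide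

lemma foldl_alt (cs : List Char) : ∀ (toks : List (List Char)) (cur : List Char),
    (List.foldl pvAltStep (toks, cur) cs).1 ++ [(List.foldl pvAltStep (toks, cur) cs).2]
      = toks ++ pvGlue cur (pvTok (List.flatMap pvEmit cs)) := by
  induction cs with
  | nil => intro toks cur; simp [pvTok, pvGlue]
  | cons c rest ih =>
    intro toks cur
    simp only [List.foldl_cons, List.flatMap_cons, pvAltStep]
    by_cases ha : PySem.Chars.isalpha c
    · have hc : c ≠ ',' := fun h => by rw [h] at ha; exact absurd ha (by simp [isalpha_comma])
      rw [if_pos ha]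
      rw [ih]
      simp only [pvEmit, if_pos ha]
      simp only [List.cons_append, List.nil_append]
      simp only [pvTok, if_neg hc]
      cases ht : pvTok (List.flatMap pvEmit rest) with
      | nil => exact absurd ht (pvTok_ne_nil _)
      | cons t ts => simp [pvGlue]
    · rw [if_neg ha]
      by_cases hc : c = ','
      · rw [if_pos hc]
        rw [ih]
        subst hc
        simp only [pvEmit, if_neg ha, List.singleton_append]
        simp only [pvTok]
        rw [pvGlue_nil]
        simp [pvGlue]
      · rw [if_neg hc]
        rw [ih]
        simp only [pvEmit, if_neg ha, List.singleton_append]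
        simp only [pvTok, if_neg hc]
        cases ht : pvTok (List.flatMap pvEmit rest) with
        | nil => exact absurd ht (pvTok_ne_nil _)
        | cons t ts => simp [pvGlue]

lemma tokens_eq (cs : List Char) :
    PySem.Chars.splitOn
      (cs.foldl (fun acc c => if PySem.Chars.isalpha c then acc ++ [c, ','] else acc ++ [c]) []) [','] =
    (List.foldl pvAltStep ([], []) cs).1 ++ [(List.foldl pvAltStep ([], []) cs).2] := by
  have hA : cs.foldl (fun acc c => if PySem.Chars.isalpha c then acc ++ [c, ','] else acc ++ [c]) []
      = List.flatMap pvEmit cs := by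
    have : (fun (acc : List Char) (c : Char) =>
        if PySem.Chars.isalpha c then acc ++ [c, ','] else acc ++ [c])
        = fun acc c => acc ++ pvEmit c := by
      funext acc c
      simp only [pvEmit]
      split <;> rfl
    rw [this, PySem.List.foldl_append_eq_flatMap]
    simp
  rw [hA, splitOn_comma, foldl_alt cs [] []]
  rw [pvGlue_nil]
  simp

-- ===== VERDICT (by name: the statement is the Claim_ definition above) =====
theorem parse_design_string_spec : Claim_equal_parse_design_string := by
  intro s _ _
  unfold Spec_parse_design_string parse_design_string parse_design_string_alt
  exact congrArg (fun tokens : List (List Char) =>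
    (String.ofList (PySem.List.pyGetD tokens 0 []),
     String.ofList (PySem.List.pyGetD tokens 1 []),
     (PySem.List.slice tokens (some 2) (some (-1))).map String.ofList,
     (PySem.Int.ofChars? (PySem.List.pyGetD tokens (-1) [])).getD 0)) (tokens_eq s.toList)
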